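-- pv_equiv track=rewrite | github.com/fy-labs/md-spreadsheet-parser | src/md_spreadsheet_parser/parsing.py | split_row_gfm
-- ===== SOURCE A (Python) =====
-- def split_row_gfm(line: str, separator: str) -> list[str]:
--     """
--     Split a line by separator, respecting GFM rules:
--     - Ignore separators inside inline code (backticks).
--     - Ignore escaped separators.
--     """
--     parts: list[str] = []
--     current_part: list[str] = []
--     in_code = False
--     i = 0
--     n = len(line)
--
--     while i < n:
--         char = line[i]
--
--         if char == "\\":
--             # Escape character
--             # If we are NOT in code, this might be escaping the separator.
--             # We keep the backslash for clean_cell to handle (e.g. \| -> |).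
--             # But we must treat the next specific char as literal for splitting purposes.
--             current_part.append(char)
--             if i + 1 < n:
--                 # Add the next char unconditionally (skip separator check for it)
--                 current_part.append(line[i + 1])
--                 i += 2
--                 continue
--             else:
--                 # Trailing backslash
--                 i += 1
--                 continue
--
--         if char == "`":
--             in_code = not in_code
--
--         if char == separator and not in_code:
--             # Found a valid separator
--             parts.append("".join(current_part))
--             current_part = []
--         else:
--             current_part.append(char)
--
--         i += 1
--
--     # Append the last part
--     parts.append("".join(current_part))
--     return parts
-- ===== SOURCE B (Python) =====
-- def split_row_gfm(line: str, separator: str) -> list[str]: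
--     # One scan records the indices of valid separator chars; the parts are
--     # then produced by slicing the original line -- no char buffers.
--     cuts = []
--     in_code = False
--     i = 0
--     n = len(line)
--     while i < n:
--         char = line[i]
--         if char == "\\":
--             i += 2 if i + 1 < n else 1
--             continue
--         if char == "`":
--             in_code = not in_code
--         if char == separator and not in_code:
--             cuts.append(i)
--         i += 1
--     parts = []
--     start = 0
--     for p in cuts:
--         parts.append(line[start:p])
--         start = p + 1
--     parts.append(line[start:])
--     return parts
-- ===== Notes on version B (the rewrite author's own statement) =====
-- stated objective: alternative
-- what changed: B no longer builds per-part character buffers: one scan records only the indices of valid separators, and the parts are then emitted by slicing the original line at those indices.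
import Mathlib
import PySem

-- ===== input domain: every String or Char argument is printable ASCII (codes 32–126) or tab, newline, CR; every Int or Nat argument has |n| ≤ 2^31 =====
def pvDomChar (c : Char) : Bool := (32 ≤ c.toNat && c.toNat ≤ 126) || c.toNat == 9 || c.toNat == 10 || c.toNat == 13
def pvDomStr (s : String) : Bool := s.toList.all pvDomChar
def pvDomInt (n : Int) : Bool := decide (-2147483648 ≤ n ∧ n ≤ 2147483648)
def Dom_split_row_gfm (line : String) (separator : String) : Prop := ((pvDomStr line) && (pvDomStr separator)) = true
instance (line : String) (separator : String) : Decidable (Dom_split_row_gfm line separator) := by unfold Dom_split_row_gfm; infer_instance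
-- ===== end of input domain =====

-- B records separator indices in one scan and emits the parts by slicing the line;
-- A accumulates per-part character buffers.  Same cost; proved equal on all inputs.

-- ===== PORT A =====
-- literal port of A's while-loop: state = (remaining chars, in_code, current_part, parts)
def goA (sep : String) : List Char → Bool → List Char → List String → List String
  | [], _, cur, parts => parts ++ [String.ofList cur]
  | c :: rest, inc, cur, parts =>
    if c = '\\' then
      match rest with
      | c2 :: rest2 => goA sep rest2 inc (cur ++ [c, c2]) parts
      | [] => goA sep [] inc (cur ++ [c]) parts            -- trailing backslash
    else
      let inc' := if c = '`' then !inc else inc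
      if String.ofList [c] = sep ∧ inc' = false then
        goA sep rest inc' [] (parts ++ [String.ofList cur])
      else
        goA sep rest inc' (cur ++ [c]) parts
termination_by l => l.length
decreasing_by all_goals simp

def split_row_gfm (line : String) (separator : String) : List String :=
  goA separator line.toList false [] []

-- ===== PORT B =====
-- B's scan: records indices of valid separators (cuts), same escape/backtick logic
def goB (sep : String) : List Char → Nat → Bool → List Nat → List Nat
  | [], _, _, cuts => cuts
  | c :: rest, i, inc, cuts =>
    if c = '\\' then
      match rest with
      | _ :: rest2 => goB sep rest2 (i + 2) inc cuts
      | [] => goB sep [] (i + 1) inc cuts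
    else
      let inc' := if c = '`' then !inc else inc
      if String.ofList [c] = sep ∧ inc' = false then
        goB sep rest (i + 1) inc' (cuts ++ [i])
      else
        goB sep rest (i + 1) inc' cuts
termination_by l => l.length
decreasing_by all_goals simp

-- B's emit loop: for each cut p, slice line[start:p], then the final line[start:]
def emitB (cs : List Char) : List Nat → Nat → List String
  | [], start => [String.ofList (cs.drop start)]
  | p :: ps, start => String.ofList ((cs.drop start).take (p - start)) :: emitB cs ps (p + 1)

def split_row_gfm_alt (line : String) (separator : String) : List String :=
  emitB line.toList (goB separator line.toList 0 false []) 0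

-- ===== PRECONDITION & SPEC =====
def Spec_split_row_gfm (line : String) (separator : String) (out : List String) : Prop := out = split_row_gfm_alt line separator
instance (line : String) (separator : String) (out : List String) : Decidable (Spec_split_row_gfm line separator out) := by unfold Spec_split_row_gfm; infer_instance

-- ===== CLAIM (what is proved, stated in full; the proofs are below) =====
def Claim_equal_split_row_gfm : Prop := ∀ (line : String) (separator : String), Dom_split_row_gfm line separator → Spec_split_row_gfm line separator (split_row_gfm line separator)

-- ===== LEMMAS AND PROOFS =====

-- reference splitter over char lists: both ports are proved equal to `map String.ofList (R sep cs false)`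
def consC0 (xs : List Char) : List (List Char) → List (List Char)
  | [] => [xs]
  | h :: t => (xs ++ h) :: t

def R (sep : String) : List Char → Bool → List (List Char)
  | [], _ => [[]]
  | c :: rest, inc =>
    if c = '\\' then
      match rest with
      | c2 :: rest2 => consC0 [c, c2] (R sep rest2 inc)
      | [] => consC0 [c] (R sep [] inc)
    else
      let inc' := if c = '`' then !inc else inc
      if String.ofList [c] = sep ∧ inc' = false then
        [] :: R sep rest inc'
      else
        consC0 [c] (R sep rest inc')
termination_by l => l.length
decreasing_by all_goals simp

-- unfolding lemmas (the definitions are by well-founded recursion, so `rw` needs these)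
lemma R_nil (sep : String) (inc : Bool) : R sep [] inc = [[]] := by
  rw [R.eq_def]

lemma R_esc2 (sep : String) (c2 : Char) (rest2 : List Char) (inc : Bool) :
    R sep ('\\'::c2::rest2) inc = consC0 ['\\', c2] (R sep rest2 inc) := by
  rw [R.eq_def]; rfl

lemma R_esc1 (sep : String) (inc : Bool) : R sep ['\\'] inc = [['\\']] := by
  rw [R.eq_def]; simp [R, consC0]

lemma R_cut (sep : String) (c : Char) (rest : List Char) (inc : Bool) (hc : ¬ c = '\\')
    (hs : String.ofList [c] = sep ∧ (if c = '`' then !inc else inc) = false) :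
    R sep (c::rest) inc = [] :: R sep rest (if c = '`' then !inc else inc) := by
  rcases rest with _ | ⟨c2, r2⟩
  · rw [R.eq_3, if_neg hc, if_pos hs]
  · rw [R.eq_2, if_neg hc, if_pos hs]

lemma R_nocut (sep : String) (c : Char) (rest : List Char) (inc : Bool) (hc : ¬ c = '\\')
    (hs : ¬(String.ofList [c] = sep ∧ (if c = '`' then !inc else inc) = false)) :
    R sep (c::rest) inc = consC0 [c] (R sep rest (if c = '`' then !inc else inc)) := by
  rcases rest with _ | ⟨c2, r2⟩
  · rw [R.eq_3, if_neg hc, if_neg hs]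
  · rw [R.eq_2, if_neg hc, if_neg hs]

lemma goA_nil (sep : String) (inc : Bool) (cur : List Char) (parts : List String) :
    goA sep [] inc cur parts = parts ++ [String.ofList cur] := by
  rw [goA.eq_def]

lemma goA_esc2 (sep : String) (c2 : Char) (rest2 : List Char) (inc : Bool) (cur : List Char) (parts : List String) :
    goA sep ('\\'::c2::rest2) inc cur parts = goA sep rest2 inc (cur ++ ['\\', c2]) parts := by
  rw [goA.eq_def]; rfl

lemma goA_esc1 (sep : String) (inc : Bool) (cur : List Char) (parts : List String) :
    goA sep ['\\'] inc cur parts = goA sep [] inc (cur ++ ['\\']) parts := by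
  rw [goA.eq_def]; rfl

lemma goA_cut (sep : String) (c : Char) (rest : List Char) (inc : Bool) (cur : List Char) (parts : List String)
    (hc : ¬ c = '\\') (hs : String.ofList [c] = sep ∧ (if c = '`' then !inc else inc) = false) :
    goA sep (c::rest) inc cur parts
      = goA sep rest (if c = '`' then !inc else inc) [] (parts ++ [String.ofList cur]) := by
  rcases rest with _ | ⟨c2, r2⟩
  · rw [goA.eq_3, if_neg hc, if_pos hs]
  · rw [goA.eq_2, if_neg hc, if_pos hs]

lemma goA_nocut (sep : String) (c : Char) (rest : List Char) (inc : Bool) (cur : List Char) (parts : List String)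
    (hc : ¬ c = '\\') (hs : ¬(String.ofList [c] = sep ∧ (if c = '`' then !inc else inc) = false)) :
    goA sep (c::rest) inc cur parts
      = goA sep rest (if c = '`' then !inc else inc) (cur ++ [c]) parts := by
  rcases rest with _ | ⟨c2, r2⟩
  · rw [goA.eq_3, if_neg hc, if_neg hs]
  · rw [goA.eq_2, if_neg hc, if_neg hs]

lemma goB_nil (sep : String) (i : Nat) (inc : Bool) (cuts : List Nat) :
    goB sep [] i inc cuts = cuts := by
  rw [goB.eq_def]

lemma goB_esc2 (sep : String) (c2 : Char) (rest2 : List Char) (i : Nat) (inc : Bool) (cuts : List Nat) :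
    goB sep ('\\'::c2::rest2) i inc cuts = goB sep rest2 (i+2) inc cuts := by
  rw [goB.eq_def]; rfl

lemma goB_esc1 (sep : String) (i : Nat) (inc : Bool) (cuts : List Nat) :
    goB sep ['\\'] i inc cuts = goB sep [] (i+1) inc cuts := by
  rw [goB.eq_def]; rfl

lemma goB_cut (sep : String) (c : Char) (rest : List Char) (i : Nat) (inc : Bool) (cuts : List Nat)
    (hc : ¬ c = '\\') (hs : String.ofList [c] = sep ∧ (if c = '`' then !inc else inc) = false) :
    goB sep (c::rest) i inc cuts = goB sep rest (i+1) (if c = '`' then !inc else inc) (cuts ++ [i]) := by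
  rcases rest with _ | ⟨c2, r2⟩
  · rw [goB.eq_3, if_neg hc, if_pos hs]
  · rw [goB.eq_2, if_neg hc, if_pos hs]

lemma goB_nocut (sep : String) (c : Char) (rest : List Char) (i : Nat) (inc : Bool) (cuts : List Nat)
    (hc : ¬ c = '\\') (hs : ¬(String.ofList [c] = sep ∧ (if c = '`' then !inc else inc) = false)) :
    goB sep (c::rest) i inc cuts = goB sep rest (i+1) (if c = '`' then !inc else inc) cuts := by
  rcases rest with _ | ⟨c2, r2⟩
  · rw [goB.eq_3, if_neg hc, if_neg hs]
  · rw [goB.eq_2, if_neg hc, if_neg hs]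

lemma consC0_ne_nil (xs : List Char) (X : List (List Char)) : consC0 xs X ≠ [] := by
  cases X <;> simp [consC0]

lemma R_ne_nil (sep : String) (l : List Char) (inc : Bool) : R sep l inc ≠ [] := by
  cases l with
  | nil => simp [R_nil]
  | cons c rest =>
    by_cases hc : c = '\\'
    · subst hc
      rcases rest with _ | ⟨c2, r2⟩
      · simp [R_esc1]
      · rw [R_esc2]; exact consC0_ne_nil _ _
    · by_cases hs : String.ofList [c] = sep ∧ (if c = '`' then !inc else inc) = false
      · simp [R_cut sep c rest inc hc hs]
      · rw [R_nocut sep c rest inc hc hs]; exact consC0_ne_nil _ _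

lemma consC0_consC0 (a b : List Char) (X : List (List Char)) :
    consC0 a (consC0 b X) = consC0 (a ++ b) X := by
  cases X <;> simp [consC0]

lemma consC0_nil (Y : List (List Char)) (h : Y ≠ []) : consC0 [] Y = Y := by
  cases Y <;> simp_all [consC0]

lemma goA_eq (sep : String) (n : Nat) :
    ∀ l : List Char, l.length = n → ∀ (inc : Bool) (cur : List Char) (parts : List String),
      goA sep l inc cur parts = parts ++ (consC0 cur (R sep l inc)).map String.ofList := by
  induction n using Nat.strong_induction_on with
  | _ n ih =>
    intro l hl inc cur parts
    rcases l with _ | ⟨c, rest⟩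
    · simp [goA_nil, R_nil, consC0]
    · by_cases hc : c = '\\'
      · subst hc
        rcases rest with _ | ⟨c2, rest2⟩
        · rw [goA_esc1, goA_nil, R_esc1]
          simp [consC0]
        · rw [goA_esc2,
              ih rest2.length (by simp at hl; omega) rest2 rfl inc (cur ++ ['\\', c2]) parts,
              R_esc2, consC0_consC0]
      · by_cases hs : String.ofList [c] = sep ∧ (if c = '`' then !inc else inc) = false
        · rw [goA_cut sep c rest inc cur parts hc hs,
              ih rest.length (by simp at hl; omega) rest rfl _ [] (parts ++ [String.ofList cur]),
              R_cut sep c rest inc hc hs,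
              consC0_nil _ (R_ne_nil _ _ _)]
          simp [consC0]
        · rw [goA_nocut sep c rest inc cur parts hc hs,
              ih rest.length (by simp at hl; omega) rest rfl _ (cur ++ [c]) parts,
              R_nocut sep c rest inc hc hs, consC0_consC0]

-- head-prepend on a list of strings (spec-level helper for emitB)
def strCons (x : Char) : List String → List String
  | [] => [String.ofList [x]]
  | s :: t => String.ofList (x :: s.toList) :: t

lemma map_mk_consC0 (x : Char) (X : List (List Char)) :
    (consC0 [x] X).map String.ofList = strCons x (X.map String.ofList) := by
  cases X <;> simp [consC0, strCons, String.toList_ofList]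

lemma goB_acc (sep : String) (n : Nat) :
    ∀ l : List Char, l.length = n → ∀ (i : Nat) (inc : Bool) (cuts : List Nat),
      goB sep l i inc cuts = cuts ++ goB sep l i inc [] := by
  induction n using Nat.strong_induction_on with
  | _ n ih =>
    intro l hl i inc cuts
    rcases l with _ | ⟨c, rest⟩
    · simp [goB_nil]
    · by_cases hc : c = '\\'
      · subst hc
        rcases rest with _ | ⟨c2, rest2⟩
        · simp [goB_esc1, goB_nil]
        · rw [goB_esc2, goB_esc2]
          exact ih rest2.length (by simp at hl; omega) rest2 rfl (i+2) inc cuts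
      · by_cases hs : String.ofList [c] = sep ∧ (if c = '`' then !inc else inc) = false
        · rw [goB_cut sep c rest i inc cuts hc hs, goB_cut sep c rest i inc [] hc hs,
              ih rest.length (by simp at hl; omega) rest rfl _ _ (cuts ++ [i]),
              ih rest.length (by simp at hl; omega) rest rfl _ _ ([] ++ [i])]
          simp
        · rw [goB_nocut sep c rest i inc cuts hc hs, goB_nocut sep c rest i inc [] hc hs]
          exact ih rest.length (by simp at hl; omega) rest rfl (i+1) _ cuts

lemma goB_ge (sep : String) (n : Nat) :
    ∀ l : List Char, l.length = n → ∀ (i : Nat) (inc : Bool) (p : Nat),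
      p ∈ goB sep l i inc [] → i ≤ p := by
  induction n using Nat.strong_induction_on with
  | _ n ih =>
    intro l hl i inc p hp
    rcases l with _ | ⟨c, rest⟩
    · simp [goB_nil] at hp
    · by_cases hc : c = '\\'
      · subst hc
        rcases rest with _ | ⟨c2, rest2⟩
        · simp [goB_esc1, goB_nil] at hp
        · rw [goB_esc2] at hp
          have := ih rest2.length (by simp at hl; omega) rest2 rfl (i+2) inc p hp
          omega
      · by_cases hs : String.ofList [c] = sep ∧ (if c = '`' then !inc else inc) = false
        · rw [goB_cut sep c rest i inc [] hc hs,
              goB_acc sep rest.length rest rfl] at hp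
          rcases List.mem_append.mp hp with h1 | h2
          · simp at h1; omega
          · have := ih rest.length (by simp at hl; omega) rest rfl (i+1) _ p h2
            omega
        · rw [goB_nocut sep c rest i inc [] hc hs] at hp
          have := ih rest.length (by simp at hl; omega) rest rfl (i+1) _ p hp
          omega

lemma emitB_cons (cs : List Char) (x : Char) (cuts : List Nat) :
    ∀ i : Nat, cs.drop i = x :: cs.drop (i + 1) → (∀ p ∈ cuts, i < p) →
      emitB cs cuts i = strCons x (emitB cs cuts (i + 1)) := by
  intro i h hall
  cases cuts with
  | nil => simp [emitB, strCons, String.toList_ofList, h]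
  | cons p ps =>
    have hp : i < p := hall p (by simp)
    have ht : p - i = (p - (i+1)) + 1 := by omega
    simp only [emitB, strCons, String.toList_ofList]
    rw [h, ht, List.take_succ_cons]

lemma goB_emit (sep : String) (cs : List Char) (n : Nat) :
    ∀ (i : Nat) (inc : Bool), (cs.drop i).length = n →
      emitB cs (goB sep (cs.drop i) i inc []) i = (R sep (cs.drop i) inc).map String.ofList := by
  induction n using Nat.strong_induction_on with
  | _ n ih =>
    intro i inc hn
    rcases h : cs.drop i with _ | ⟨c, rest⟩
    · simp [goB_nil, emitB, R_nil, h]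
    · have h1 : cs.drop (i+1) = rest := by rw [← List.tail_drop, h]; rfl
      by_cases hc : c = '\\'
      · subst hc
        rcases rest with _ | ⟨c2, rest2⟩
        · rw [goB_esc1, goB_nil, R_esc1]
          simp [emitB, h]
        · have h2 : cs.drop (i+2) = rest2 := by
            rw [show i+2 = (i+1)+1 by omega, ← List.tail_drop, h1]; rfl
          rw [goB_esc2, R_esc2]
          have hge := goB_ge sep rest2.length rest2 rfl (i+2) inc
          rw [emitB_cons cs '\\' _ i (by rw [h, h1]) (by intro p hp; have := hge p hp; omega)]
          rw [emitB_cons cs c2 _ (i+1) (by rw [h1, h2]) (by intro p hp; have := hge p hp; omega)]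
          have ihm := ih rest2.length (by rw [h] at hn; simp at hn; omega) (i+2) inc (by rw [h2])
          rw [h2] at ihm
          rw [ihm, show (['\\', c2] : List Char) = ['\\'] ++ [c2] from rfl,
              ← consC0_consC0, map_mk_consC0, map_mk_consC0]
      · have hlen : rest.length < n := by rw [h] at hn; simp at hn; omega
        by_cases hs : String.ofList [c] = sep ∧ (if c = '`' then !inc else inc) = false
        · rw [goB_cut sep c rest i inc [] hc hs, R_cut sep c rest inc hc hs,
              goB_acc sep rest.length rest rfl]
          have ihm := ih rest.length hlen (i+1) (if c = '`' then !inc else inc) (by rw [h1])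
          rw [h1] at ihm
          simp only [List.nil_append, List.singleton_append, emitB, Nat.sub_self, List.take_zero]
          rw [ihm]
          simp
        · rw [goB_nocut sep c rest i inc [] hc hs, R_nocut sep c rest inc hc hs]
          have hge := goB_ge sep rest.length rest rfl (i+1) (if c = '`' then !inc else inc)
          rw [emitB_cons cs c _ i (by rw [h, h1]) (by intro p hp; have := hge p hp; omega)]
          have ihm := ih rest.length hlen (i+1) (if c = '`' then !inc else inc) (by rw [h1])
          rw [h1] at ihm
          rw [ihm, map_mk_consC0]

-- ===== VERDICT (by name: the statement is the Claim_ definition above) =====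
theorem split_row_gfm_spec : Claim_equal_split_row_gfm := by
  intro line separator _
  unfold Spec_split_row_gfm split_row_gfm split_row_gfm_alt
  rw [goA_eq separator line.toList.length line.toList rfl false [] [],
      consC0_nil _ (R_ne_nil _ _ _)]
  have h := goB_emit separator line.toList ((line.toList.drop 0).length) 0 false rfl
  simpa using h.symm
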